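-- pv_equiv track=rewrite | github.com/Sebysemily/Flu | code/download_context_and_merge_denv2_fasta.py | parse_multi_fasta
-- ===== SOURCE A (Python) =====
-- def parse_multi_fasta(text):
--     header = None
--     chunks = []
--
--     for raw_line in text.splitlines():
--         line = raw_line.strip()
--         if not line:
--             continue
--         if line.startswith(">"):
--             if header is not None:
--                 yield header, "".join(chunks)
--             header = line[1:].strip()
--             chunks = []
--         else:
--             chunks.append(line)
--
--     if header is not None:
--         yield header, "".join(chunks)
-- ===== SOURCE B (Python) =====
-- def parse_multi_fasta(text):
--     # Normalize once, then group by recursion on the header structure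
--     # (no running header/chunks state machine).
--     lines = [l for l in (raw.strip() for raw in text.splitlines()) if l]
--     # discard everything before the first header
--     i = 0
--     while i < len(lines) and not lines[i].startswith(">"):
--         i += 1
--     rest = lines[i:]
--     while rest:
--         header = rest[0][1:].strip()
--         j = 1
--         while j < len(rest) and not rest[j].startswith(">"):
--             j += 1
--         yield header, "".join(rest[1:j])
--         rest = rest[j:]
-- ===== Notes on version B (the rewrite author's own statement) =====
-- stated objective: alternative
-- what changed: Replaces A's running header/chunks/yield state machine with a two-phase pass: normalize lines once (strip, drop empties), drop everything before the first header, then group each record by scanning to the next header line.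
import Mathlib
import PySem

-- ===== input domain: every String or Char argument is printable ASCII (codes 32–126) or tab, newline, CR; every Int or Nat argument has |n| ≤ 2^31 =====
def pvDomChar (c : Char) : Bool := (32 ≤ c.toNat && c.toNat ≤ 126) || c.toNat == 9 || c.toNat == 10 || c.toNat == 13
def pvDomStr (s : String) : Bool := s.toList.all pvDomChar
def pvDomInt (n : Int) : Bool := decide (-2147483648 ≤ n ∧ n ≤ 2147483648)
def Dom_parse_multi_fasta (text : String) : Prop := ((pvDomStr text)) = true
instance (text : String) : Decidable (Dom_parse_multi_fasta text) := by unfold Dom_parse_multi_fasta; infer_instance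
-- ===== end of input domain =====

-- B replaces A's running header/chunks state machine with a normalize-then-recursive
-- grouping (drop pre-header lines, then take/drop each record); objective: alternative.


-- ===== PORT A =====
-- 'if header is not None: yield header, "".join(chunks)' — the flush done both inside the loop and at the end
def pmfFlush (st : Option String × List String × List (String × String)) : List (String × String) :=
  match st.1 with
  | some h => st.2.2 ++ [(h, PySem.Str.join "" st.2.1)]
  | none => st.2.2

-- one iteration of A's for-loop; state = (header, chunks, yielded-so-far)
def pmfStep (st : Option String × List String × List (String × String)) (raw_line : String) :
    Option String × List String × List (String × String) :=
  let line := PySem.Str.strip raw_line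
  if PySem.Str.len line == 0 then st                              -- if not line: continue
  else if PySem.Str.startswith line ">" then
    (some (PySem.Str.strip (PySem.Str.slice line (some 1) none)), [], pmfFlush st)
  else (st.1, st.2.1 ++ [line], st.2.2)

def parse_multi_fasta (text : String) : List (String × String) :=
  pmfFlush ((PySem.Str.splitlines text).foldl pmfStep (none, [], []))

-- ===== PORT B =====
def pmfNonHdr (l : String) : Bool := !(PySem.Str.startswith l ">")

-- one record per header line; body = lines until the next header
def pmfRecs : List String → List (String × String)
  | [] => []
  | h :: t =>
    (PySem.Str.strip (PySem.Str.slice h (some 1) none),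
     PySem.Str.join "" (t.takeWhile pmfNonHdr)) :: pmfRecs (t.dropWhile pmfNonHdr)
termination_by l => l.length
decreasing_by simpa using Nat.lt_succ_of_le (List.length_dropWhile_le _ _)

def parse_multi_fasta_alt (text : String) : List (String × String) :=
  let lines := (((PySem.Str.splitlines text).map PySem.Str.strip).filter
    (fun l => !(PySem.Str.len l == 0)))
  pmfRecs (lines.dropWhile pmfNonHdr)

-- ===== PRECONDITION & SPEC =====
def Spec_parse_multi_fasta (text : String) (out : List (String × String)) : Prop := out = parse_multi_fasta_alt text
instance (text : String) (out : List (String × String)) : Decidable (Spec_parse_multi_fasta text out) := by unfold Spec_parse_multi_fasta; infer_instance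

-- ===== CLAIM (what is proved, stated in full; the proofs are below) =====
def Claim_equal_parse_multi_fasta : Prop := ∀ (text : String), Dom_parse_multi_fasta text → Spec_parse_multi_fasta text (parse_multi_fasta text)

-- ===== LEMMAS AND PROOFS =====

-- A's step on an already-stripped, non-empty line
def pmfStepC (st : Option String × List String × List (String × String)) (line : String) :
    Option String × List String × List (String × String) :=
  if PySem.Str.startswith line ">" then
    (some (PySem.Str.strip (PySem.Str.slice line (some 1) none)), [], pmfFlush st)
  else (st.1, st.2.1 ++ [line], st.2.2)

lemma pmfStep_eq (st : Option String × List String × List (String × String)) (raw : String) :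
    pmfStep st raw =
      if PySem.Str.len (PySem.Str.strip raw) == 0 then st
      else pmfStepC st (PySem.Str.strip raw) := rfl

-- folding A's step over raw lines = folding the clean step over the cleaned lines
lemma foldl_step_clean (raws : List String) (st : Option String × List String × List (String × String)) :
    raws.foldl pmfStep st =
      ((raws.map PySem.Str.strip).filter (fun l => !(PySem.Str.len l == 0))).foldl pmfStepC st := by
  induction raws generalizing st with
  | nil => simp
  | cons r rs ih =>
    rw [List.foldl_cons, List.map_cons, List.filter_cons, pmfStep_eq]
    by_cases h : (PySem.Str.len (PySem.Str.strip r) == 0) = true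
    · rw [if_pos h, if_neg (by rw [h]; simp)]
      exact ih st
    · have h' : (PySem.Str.len (PySem.Str.strip r) == 0) = false := by
        cases hb : (PySem.Str.len (PySem.Str.strip r) == 0) <;> simp_all
      rw [if_neg h, if_pos (by rw [h']; rfl), List.foldl_cons]
      exact ih _

-- before the first header, non-header lines only grow the (discarded) chunks
lemma foldl_stepC_nonhdr (w : List String) (hw : ∀ l ∈ w, pmfNonHdr l = true)
    (cs : List String) (out : List (String × String)) :
    w.foldl pmfStepC (none, cs, out) = (none, cs ++ w, out) := by
  induction w generalizing cs with
  | nil => simp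
  | cons l t ih =>
    have hl : ¬ (PySem.Str.startswith l ">" = true) := by
      have h0 := hw l (by simp)
      unfold pmfNonHdr at h0
      cases hb : PySem.Str.startswith l ">" <;> simp_all
    rw [List.foldl_cons,
      show pmfStepC (none, cs, out) l = (none, cs ++ [l], out) from by
        unfold pmfStepC; rw [if_neg hl],
      ih (fun x hx => hw x (by simp [hx])) (cs ++ [l])]
    simp

-- main invariant: once a header is open, flushing the fold equals emitting the
-- current record followed by pmfRecs of the remaining headers
lemma foldl_stepC_some (rest : List String) (h : String) (cs : List String)
    (out : List (String × String)) :
    pmfFlush (rest.foldl pmfStepC (some h, cs, out)) =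
      out ++ (h, PySem.Str.join "" (cs ++ rest.takeWhile pmfNonHdr)) ::
        pmfRecs (rest.dropWhile pmfNonHdr) := by
  induction rest generalizing h cs out with
  | nil => simp [pmfFlush, pmfRecs]
  | cons l t ih =>
    rw [List.foldl_cons]
    by_cases hl : PySem.Str.startswith l ">" = true
    · have hn : pmfNonHdr l = false := by unfold pmfNonHdr; rw [hl]; rfl
      rw [show pmfStepC (some h, cs, out) l
            = (some (PySem.Str.strip (PySem.Str.slice l (some 1) none)), [],
               out ++ [(h, PySem.Str.join "" cs)]) from by
          unfold pmfStepC; rw [if_pos hl]; rfl,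
        ih]
      rw [List.takeWhile_cons, List.dropWhile_cons]
      simp only [hn, Bool.false_eq_true, if_false, pmfRecs]
      simp
    · have h0 : PySem.Str.startswith l ">" = false := by
        cases hb : PySem.Str.startswith l ">" <;> simp_all
      have hn : pmfNonHdr l = true := by unfold pmfNonHdr; rw [h0]; rfl
      rw [show pmfStepC (some h, cs, out) l = (some h, cs ++ [l], out) from by
          unfold pmfStepC; rw [if_neg hl],
        ih]
      rw [List.takeWhile_cons, List.dropWhile_cons]
      simp only [hn, if_true]
      simp

lemma dropWhile_head_false {p : String → Bool} (l : List String) (x : String)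
    (xs : List String) (h : l.dropWhile p = x :: xs) : p x = false := by
  induction l with
  | nil => simp at h
  | cons a t ih =>
    rw [List.dropWhile_cons] at h
    by_cases ha : p a = true
    · exact ih (by simpa [ha] using h)
    · have ha' : p a = false := by cases hb : p a <;> simp_all
      rw [ha', if_neg (by simp)] at h
      injection h with h1 _
      rw [← h1]; exact ha'

lemma pmf_main (lines : List String) :
    pmfFlush (lines.foldl pmfStepC (none, [], [])) = pmfRecs (lines.dropWhile pmfNonHdr) := by
  have hfold : lines.foldl pmfStepC (none, [], []) =
      (lines.dropWhile pmfNonHdr).foldl pmfStepC (none, lines.takeWhile pmfNonHdr, []) := by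
    conv_lhs => rw [← List.takeWhile_append_dropWhile (p := pmfNonHdr) (l := lines)]
    rw [List.foldl_append, foldl_stepC_nonhdr _ (fun l hl => List.mem_takeWhile_imp hl) [] []]
    simp
  rw [hfold]
  cases hr : lines.dropWhile pmfNonHdr with
  | nil => simp [pmfFlush, pmfRecs]
  | cons l t =>
    have h0 := dropWhile_head_false lines l t hr
    have hl : PySem.Str.startswith l ">" = true := by
      unfold pmfNonHdr at h0
      cases hb : PySem.Str.startswith l ">" <;> simp_all
    rw [List.foldl_cons,
      show pmfStepC (none, lines.takeWhile pmfNonHdr, ([] : List (String × String))) l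
          = (some (PySem.Str.strip (PySem.Str.slice l (some 1) none)), [], []) from by
        unfold pmfStepC; rw [if_pos hl]; rfl,
      foldl_stepC_some]
    simp [pmfRecs]

-- ===== VERDICT (by name: the statement is the Claim_ definition above) =====
theorem parse_multi_fasta_spec : Claim_equal_parse_multi_fasta := by
  intro text _
  unfold Spec_parse_multi_fasta parse_multi_fasta parse_multi_fasta_alt
  rw [foldl_step_clean, pmf_main]
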